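-- pv_equiv track=rewrite | github.com/IvanaXu/leetcode | 1417.reformat-the-string.py | reformat
-- ===== SOURCE A (Python) =====
-- def reformat(s: str) -> str:
--     _rc, _rn = [], []
--     for i in s:
--         if i in "0123456789":
--             _rn.append(i)
--         else:
--             _rc.append(i)
--     #
--     _r, _lc, _ln = [], len(_rc), len(_rn)
--     if (_lc == 0 and _ln > 1) or (_ln == 0 and _lc > 1):
--         return ""
--     elif abs(_lc-_ln) > 1:
--         return ""
--     elif _lc > _ln:
--         _r = [_rc[0]]
--         for i in range(_ln):
--             _r.extend([_rn[i], _rc[i+1]])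
--     elif _lc == _ln:
--         for i in range(_lc):
--             _r.extend([_rc[i], _rn[i]])
--     elif _lc < _ln:
--         _r = [_rn[0]]
--         for i in range(_lc):
--             _r.extend([_rc[i], _rn[i+1]])
--     return "".join(_r)
-- ===== SOURCE B (Python) =====
-- def reformat(s: str) -> str:
--     nd = sum(c in "0123456789" for c in s)
--     nl = len(s) - nd
--     if abs(nl - nd) > 1:
--         return ""
--     out = [None] * len(s)
--     li = 0 if nl >= nd else 1   # letters take even slots when they are not outnumbered
--     di = 1 - li
--     for c in s:
--         if c in "0123456789":
--             out[di] = c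
--             di += 2
--         else:
--             out[li] = c
--             li += 2
--     return "".join(out)
-- ===== Notes on version B (the rewrite author's own statement) =====
-- stated objective: alternative
-- what changed: Instead of partitioning into letter/digit lists and then interleaving them in three indexed branches, B preallocates the output array and, in a single pass over s, writes each character directly into its final position (letters at even slots, digits at odd, or swapped when digits outnumber letters), using only a digit count to pick the parity and reject |letters-digits|>1.
import Mathlib
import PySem

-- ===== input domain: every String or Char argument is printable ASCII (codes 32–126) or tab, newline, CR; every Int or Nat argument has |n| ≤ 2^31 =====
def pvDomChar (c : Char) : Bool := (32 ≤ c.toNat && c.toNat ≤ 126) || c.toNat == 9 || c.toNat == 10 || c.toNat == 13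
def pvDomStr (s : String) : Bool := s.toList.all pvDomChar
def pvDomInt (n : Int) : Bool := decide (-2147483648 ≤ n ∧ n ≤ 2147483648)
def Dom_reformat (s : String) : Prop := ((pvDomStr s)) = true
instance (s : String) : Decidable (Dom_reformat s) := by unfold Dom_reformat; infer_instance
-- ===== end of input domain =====

-- B replaces A's partition-then-interleave (three indexed branches) by direct positional
-- placement: one pass writes each character into its final even/odd slot of a
-- preallocated output array (objective: alternative — same O(n) cost, different algorithm).

-- ===== PORT A =====
-- indices rc[0], rn[i], rc[i+1], … are always in range in their branches (guarded by the
-- length tests), so Python never raises there; getD is exact.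
def reformat (s : String) : String :=
  let p := s.toList.foldl
    (fun (st : List Char × List Char) i =>
      if ("0123456789".toList.contains i) then (st.1, st.2 ++ [i]) else (st.1 ++ [i], st.2))
    (([], []) : List Char × List Char)
  let rc := p.1
  let rn := p.2
  let lc := rc.length
  let ln := rn.length
  if (lc == 0 && decide (ln > 1)) || (ln == 0 && decide (lc > 1)) then ""
  else if ((lc : Int) - (ln : Int)).natAbs > 1 then ""
  else if lc > ln then
    String.mk ((List.range ln).foldl (fun r i => r ++ [rn.getD i ' ', rc.getD (i+1) ' ']) [rc.getD 0 ' '])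
  else if lc = ln then
    String.mk ((List.range lc).foldl (fun r i => r ++ [rc.getD i ' ', rn.getD i ' ']) ([] : List Char))
  else
    String.mk ((List.range lc).foldl (fun r i => r ++ [rc.getD i ' ', rn.getD (i+1) ' ']) [rn.getD 0 ' '])

-- ===== PORT B =====
-- out = [None]*len(s): the None placeholder becomes '?'; every slot is overwritten
-- before join (counts fill the array exactly), so the placeholder is never read.
-- out[di] = c / out[li] = c become List.set at indices that are always in range.
def reformat_alt (s : String) : String :=
  let nd := s.toList.foldl (fun a c => a + (if "0123456789".toList.contains c then 1 else 0)) 0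
  let nl := s.toList.length - nd
  if ((nl : Int) - (nd : Int)).natAbs > 1 then ""
  else
    let li := if nl ≥ nd then 0 else 1
    let di := 1 - li
    let st := s.toList.foldl
      (fun (st : List Char × Nat × Nat) c =>
        if "0123456789".toList.contains c then (st.1.set st.2.2 c, st.2.1, st.2.2 + 2)
        else (st.1.set st.2.1 c, st.2.1 + 2, st.2.2))
      (List.replicate s.toList.length '?', li, di)
    String.mk st.1

-- ===== PRECONDITION & SPEC =====
def Spec_reformat (s : String) (out : String) : Prop := out = reformat_alt s
instance (s : String) (out : String) : Decidable (Spec_reformat s out) := by unfold Spec_reformat; infer_instance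

-- ===== CLAIM (what is proved, stated in full; the proofs are below) =====
def Claim_equal_reformat : Prop := ∀ (s : String), Dom_reformat s → Spec_reformat s (reformat s)

-- ===== LEMMAS AND PROOFS =====

def pvJoin2 (p : List (Char × Char)) : List Char := p.flatMap (fun ab => [ab.1, ab.2])

-- place xs at positions i, i+2, i+4, … of buf
def pvPlace (buf : List Char) (i : Nat) : List Char → List Char
  | [] => buf
  | x :: xs => pvPlace (buf.set i x) (i + 2) xs

theorem pvPartition (p : Char → Bool) : ∀ (l a b : List Char),
    l.foldl
      (fun (st : List Char × List Char) i =>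
        if p i then (st.1, st.2 ++ [i]) else (st.1 ++ [i], st.2))
      (a, b)
    = (a ++ l.filter (fun c => !(p c)), b ++ l.filter (fun c => p c)) := by
  intro l
  induction l with
  | nil => intro a b; simp
  | cons hd tl ih =>
    intro a b
    by_cases h : p hd = true
    · simp [h, ih]
    · simp [h, ih]

theorem pvGetDTake (X : List Char) (m : Nat) (hm : m < X.length) :
    X.take (m+1) = X.take m ++ [X.getD m ' '] := by
  rw [List.take_add_one]
  rw [List.getElem?_eq_getElem hm, List.getD_eq_getElem X ' ' hm]
  simp

theorem pvRangeFold (X Y : List Char) : ∀ (n : ℕ) (acc : List Char),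
    n ≤ X.length → n ≤ Y.length →
    (List.range n).foldl (fun r i => r ++ [X.getD i ' ', Y.getD i ' ']) acc
      = acc ++ pvJoin2 ((X.take n).zip (Y.take n)) := by
  intro n
  induction n with
  | zero => intro acc _ _; simp [pvJoin2]
  | succ m ih =>
    intro acc hX hY
    rw [List.range_succ, List.foldl_append, ih acc (by omega) (by omega)]
    rw [pvGetDTake X m (by omega), pvGetDTake Y m (by omega),
      List.zip_append (by simp; omega)]
    simp [pvJoin2, List.foldl]

theorem pvInter : ∀ (Y X : List Char), X.length = Y.length + 1 →
    X.getD 0 ' ' :: pvJoin2 (Y.zip (X.drop 1)) = pvJoin2 (X.zip Y) ++ X.drop Y.length := by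
  intro Y
  induction Y with
  | nil =>
    intro X h
    match X, h with
    | [x], _ => simp [pvJoin2]
  | cons d ds ih =>
    intro X h
    match X, h with
    | x :: xs, h =>
      have hxs : xs.length = ds.length + 1 := by simpa using h
      match xs, hxs with
      | y :: ys, hxs =>
        have key := ih (y :: ys) hxs
        simp only [pvJoin2, List.zip_cons_cons, List.flatMap_cons, List.drop_succ_cons,
          List.drop_one, List.drop_zero, List.tail_cons, List.getD_cons_zero,
          List.length_cons, List.nil_append, List.cons_append, List.append_assoc] at key ⊢
        rw [key]

theorem pvCount (p : Char → Bool) : ∀ (l : List Char) (n : Nat),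
    l.foldl (fun a c => a + (if p c then 1 else 0)) n = n + (l.filter p).length := by
  intro l
  induction l with
  | nil => intro n; simp
  | cons hd tl ih =>
    intro n
    by_cases h : p hd = true <;> simp [h, ih] <;> omega

theorem pvFilterLen (p : Char → Bool) (l : List Char) :
    (l.filter (fun c => !(p c))).length + (l.filter p).length = l.length := by
  induction l with
  | nil => simp
  | cons hd tl ih => by_cases h : p hd = true <;> simp [h] <;> omega

theorem pvShift : ∀ (xs : List Char) (buf : List Char) (x : Char) (i : Nat),
    pvPlace (x :: buf) (i + 1) xs = x :: pvPlace buf i xs := by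
  intro xs
  induction xs with
  | nil => intro buf x i; simp [pvPlace]
  | cons y ys ih =>
    intro buf x i
    show pvPlace ((x :: buf).set (i+1) y) (i+1+2) ys = x :: pvPlace (buf.set i y) (i+2) ys
    have : (x :: buf).set (i+1) y = x :: buf.set i y := by simp [List.set]
    rw [this, show i + 1 + 2 = (i + 2) + 1 by omega, ih]

theorem pvPlaceSetComm : ∀ (xs : List Char) (buf : List Char) (c : Char) (i j : Nat),
    i % 2 ≠ j % 2 →
    pvPlace (buf.set j c) i xs = (pvPlace buf i xs).set j c := by
  intro xs
  induction xs with
  | nil => intro buf c i j _; simp [pvPlace]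
  | cons x xs' ih =>
    intro buf c i j h
    simp only [pvPlace]
    rw [List.set_comm c x (by omega : j ≠ i), ih _ _ _ _ (by omega)]

theorem pvPlacePlaceComm : ∀ (ys xs : List Char) (buf : List Char) (i j : Nat),
    i % 2 ≠ j % 2 →
    pvPlace (pvPlace buf j ys) i xs = pvPlace (pvPlace buf i xs) j ys := by
  intro ys
  induction ys with
  | nil => intro xs buf i j _; simp [pvPlace]
  | cons y ys' ih =>
    intro xs buf i j h
    simp only [pvPlace]
    rw [ih xs (buf.set j y) i (j+2) (by omega), pvPlaceSetComm xs buf y i j h]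

theorem pvFoldChar (p : Char → Bool) : ∀ (l buf : List Char) (li di : Nat),
    li % 2 ≠ di % 2 →
    (l.foldl
      (fun (st : List Char × Nat × Nat) c =>
        if p c then (st.1.set st.2.2 c, st.2.1, st.2.2 + 2)
        else (st.1.set st.2.1 c, st.2.1 + 2, st.2.2))
      (buf, li, di)).1
    = pvPlace (pvPlace buf li (l.filter (fun c => !(p c)))) di (l.filter p) := by
  intro l
  induction l with
  | nil => intro buf li di _; simp [pvPlace]
  | cons c l' ih =>
    intro buf li di h
    by_cases hc : p c = true
    · simp only [List.foldl_cons, if_pos hc]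
      rw [ih (buf.set di c) li (di+2) (by omega), pvPlaceSetComm _ _ _ _ _ (by omega)]
      simp [hc, pvPlace]
    · simp only [List.foldl_cons, if_neg hc]
      rw [ih (buf.set li c) (li+2) di (by omega)]
      simp [hc, pvPlace]

theorem pvInterleave : ∀ (D L buf : List Char),
    D.length ≤ L.length → L.length ≤ D.length + 1 → buf.length = L.length + D.length →
    pvPlace (pvPlace buf 0 L) 1 D = pvJoin2 (L.zip D) ++ L.drop D.length := by
  intro D
  induction D with
  | nil =>
    intro L buf _ hle hlen
    match L, hle with
    | [], _ =>
      match buf, hlen with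
      | [], _ => simp [pvPlace, pvJoin2]
    | [a], _ =>
      match buf, hlen with
      | [x], _ => simp [pvPlace, pvJoin2, List.set]
  | cons d D' ih =>
    intro L buf hge hle hlen
    match L, hge with
    | a :: L', hge =>
      have hbuf : buf.length = L'.length + D'.length + 2 := by
        simp at hlen; omega
      match buf, hbuf with
      | x :: y :: buf', hbuf =>
        have h1 : pvPlace (x :: y :: buf') 0 (a :: L')
            = a :: y :: pvPlace buf' 0 L' := by
          simp only [pvPlace, List.set]
          rw [show (2 : Nat) = 1 + 1 from rfl, pvShift,
            show (1 : Nat) = 0 + 1 from rfl, pvShift]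
        rw [h1]
        have h2 : pvPlace (a :: y :: pvPlace buf' 0 L') 1 (d :: D')
            = a :: d :: pvPlace (pvPlace buf' 0 L') 1 D' := by
          simp only [pvPlace, List.set]
          rw [show (1 : Nat) + 2 = 2 + 1 from rfl, pvShift,
            show (2 : Nat) = 1 + 1 from rfl, pvShift]
        rw [h2, ih L' buf' (by simp at hge; omega) (by simp at hle; omega) (by simp at hbuf; omega)]
        simp [pvJoin2]

theorem pvEqCore : ∀ (s : String), reformat s = reformat_alt s := by
  intro s
  simp only [reformat, reformat_alt]
  rw [pvPartition (fun c => "0123456789".toList.contains c),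
    pvCount (fun c => "0123456789".toList.contains c)]
  simp only [List.nil_append, Nat.zero_add]
  set L := s.toList.filter (fun c => !("0123456789".toList.contains c)) with hL
  set D := s.toList.filter (fun c => "0123456789".toList.contains c) with hD
  have hlen : L.length + D.length = s.toList.length := by
    rw [hL, hD]; exact pvFilterLen (fun c => "0123456789".toList.contains c) s.toList
  have hnl : s.toList.length - D.length = L.length := by omega
  rw [hnl]
  split_ifs with g1 g2 g3 g4 g5 g6 g7 g8 g9 <;>
    first
    | rfl
    | omega
    | (simp only [Bool.or_eq_true, Bool.and_eq_true, beq_iff_eq, decide_eq_true_eq] at g1 ⊢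
       omega)
    | skip
  · -- lc > ln, letters take the even slots (li = 0, di = 1)
    have hLlen : L.length = D.length + 1 := by omega
    have hfun : (fun (r : List Char) i => r ++ [D.getD i ' ', L.getD (i+1) ' '])
        = (fun (r : List Char) i => r ++ [D.getD i ' ', (L.drop 1).getD i ' ']) := by
      funext r i
      simp [List.getD, List.getElem?_drop, Nat.add_comm]
    rw [hfun, pvRangeFold D (L.drop 1) D.length [L.getD 0 ' '] (le_refl _) (by simp [hLlen]),
      List.take_length,
      show (L.drop 1).take D.length = L.drop 1 from List.take_of_length_le (by simp [hLlen])]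
    rw [show (1 : Nat) - 0 = 1 from rfl,
      pvFoldChar (fun c => "0123456789".toList.contains c) s.toList _ 0 1 (by decide),
      ← hL, ← hD,
      pvInterleave D L _ (by omega) (by omega) (by rw [List.length_replicate]; omega)]
    have key := pvInter D L hLlen
    rw [List.singleton_append, key]
  · -- lc = ln, letters first on the tie (li = 0, di = 1)
    have heq : L.length = D.length := by omega
    rw [pvRangeFold L D L.length ([] : List Char) (le_refl _) (by omega), List.take_length,
      show D.take L.length = D by rw [heq, List.take_length]]
    rw [show (1 : Nat) - 0 = 1 from rfl,
      pvFoldChar (fun c => "0123456789".toList.contains c) s.toList _ 0 1 (by decide),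
      ← hL, ← hD,
      pvInterleave D L _ (by omega) (by omega) (by rw [List.length_replicate]; omega)]
    rw [List.nil_append, show L.drop D.length = ([] : List Char) by
        rw [← heq, List.drop_length], List.append_nil]
  · -- lc < ln, digits take the even slots (li = 1, di = 0)
    have hDlen : D.length = L.length + 1 := by omega
    have hfun : (fun (r : List Char) i => r ++ [L.getD i ' ', D.getD (i+1) ' '])
        = (fun (r : List Char) i => r ++ [L.getD i ' ', (D.drop 1).getD i ' ']) := by
      funext r i
      simp [List.getD, List.getElem?_drop, Nat.add_comm]
    rw [hfun, pvRangeFold L (D.drop 1) L.length [D.getD 0 ' '] (le_refl _) (by simp [hDlen]),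
      List.take_length,
      show (D.drop 1).take L.length = D.drop 1 from List.take_of_length_le (by simp [hDlen])]
    rw [show (1 : Nat) - 1 = 0 from rfl,
      pvFoldChar (fun c => "0123456789".toList.contains c) s.toList _ 1 0 (by decide),
      ← hL, ← hD,
      pvPlacePlaceComm L D _ 0 1 (by decide),
      pvInterleave L D _ (by omega) (by omega) (by rw [List.length_replicate]; omega)]
    have key := pvInter L D hDlen
    rw [List.singleton_append, key]

-- ===== VERDICT (by name: the statement is the Claim_ definition above) =====
theorem reformat_spec : Claim_equal_reformat := by
  intro s _
  unfold Spec_reformat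
  exact pvEqCore s
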